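-- pv_equiv track=rewrite | github.com/pabloroldan98/knapsack-football-formations | MCKP.py | get_contrained_solution
-- ===== SOURCE A (Python) =====
-- def get_contrained_solution(scores, paths, count):
--
--     score = scores[-1]
--     path = paths[-1]
--
--     scores_paths = list(zip(scores, paths))
--     sorted_by_score = sorted(scores_paths, key=lambda tup: tup[0], reverse=True)
--
--     for top_score_path in sorted_by_score:
--         if len(top_score_path[1]) == count:
--             score = top_score_path[0]
--             path = top_score_path[1]
--             break
--
--     return score, path
-- ===== SOURCE B (Python) =====
-- def get_contrained_solution(scores, paths, count):
--     # single pass: first pair with maximal score among those whose path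
--     # has the required length (strict '>' keeps the earliest on ties, which
--     # is what the stable descending sort in the original yields)
--     best = None
--     for s, p in zip(scores, paths):
--         if len(p) == count and (best is None or s > best[0]):
--             best = (s, p)
--     if best is None:
--         return scores[-1], paths[-1]
--     return best
-- ===== Notes on version B (the rewrite author's own statement) =====
-- stated objective: alternative
-- what changed: Replaces the sort of all (score, path) pairs followed by a scan for the first qualifying entry with a single linear pass that tracks the best qualifying pair, using a strict '>' update to reproduce the stable sort's first-occurrence tie-break.
import Mathlib
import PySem

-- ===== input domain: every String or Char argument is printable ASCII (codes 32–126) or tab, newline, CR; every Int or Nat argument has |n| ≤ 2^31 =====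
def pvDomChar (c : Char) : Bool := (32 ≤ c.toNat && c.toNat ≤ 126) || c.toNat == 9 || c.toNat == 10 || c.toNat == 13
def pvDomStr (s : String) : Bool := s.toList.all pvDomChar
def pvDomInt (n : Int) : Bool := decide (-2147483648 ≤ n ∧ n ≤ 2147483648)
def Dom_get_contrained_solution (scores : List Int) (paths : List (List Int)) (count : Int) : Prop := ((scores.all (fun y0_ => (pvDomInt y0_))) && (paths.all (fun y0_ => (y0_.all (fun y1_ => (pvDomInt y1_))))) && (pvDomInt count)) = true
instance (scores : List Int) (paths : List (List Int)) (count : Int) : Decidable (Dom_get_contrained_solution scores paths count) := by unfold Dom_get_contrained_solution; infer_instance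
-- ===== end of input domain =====

-- B replaces sort-then-scan by a single linear pass tracking the best qualifying pair (objective: alternative).

-- ===== PORT A =====
-- the 'for … break' loop over the descending-sorted list, threading the default (score, path)
def pvLoopA (count : Int) (d : Int × List Int) : List (Int × List Int) → Int × List Int
  | [] => d
  | t :: rest => if ((t.2.length : Int) == count) then (t.1, t.2) else pvLoopA count d rest

def get_contrained_solution (scores : List Int) (paths : List (List Int)) (count : Int) : Int × List Int :=
  match PySem.List.pyGet? scores (-1), PySem.List.pyGet? paths (-1) with
  | some score, some path =>
      let scores_paths := scores.zip paths
      let sorted_by_score := PySem.List.sorted scores_paths (fun tup => tup.1) true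
      pvLoopA count (score, path) sorted_by_score
  | _, _ => (0, [])  -- scores[-1] / paths[-1] raises IndexError (outside Pre_)

-- ===== PORT B =====
def pvStepB (count : Int) (best : Option (Int × List Int)) (t : Int × List Int) : Option (Int × List Int) :=
  if ((t.2.length : Int) == count) && (match best with | none => true | some b => decide (b.1 < t.1)) then
    some t
  else best

def get_contrained_solution_alt (scores : List Int) (paths : List (List Int)) (count : Int) : Int × List Int :=
  match (scores.zip paths).foldl (pvStepB count) none with
  | some b => b
  | none =>
    -- scores[-1] / paths[-1]; 'none' (IndexError) is outside Pre_, defaulting to (0, [])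
    (((PySem.List.pyGet? scores (-1)).bind
        (fun s0 => (PySem.List.pyGet? paths (-1)).map (fun p0 => (s0, p0)))).getD (0, []))

-- ===== PRECONDITION & SPEC =====
-- A raises IndexError (scores[-1] / paths[-1]) exactly when either list is empty.
def Pre_get_contrained_solution (scores : List Int) (paths : List (List Int)) (count : Int) : Prop :=
  scores ≠ [] ∧ paths ≠ []
instance (scores : List Int) (paths : List (List Int)) (count : Int) : Decidable (Pre_get_contrained_solution scores paths count) := by unfold Pre_get_contrained_solution; infer_instance
def pvWitness_get_contrained_solution : List Int × List (List Int) × Int := ([5, 3], [[1], [2, 0]], 1)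

def Spec_get_contrained_solution (scores : List Int) (paths : List (List Int)) (count : Int) (out : Int × List Int) : Prop := out = get_contrained_solution_alt scores paths count
instance (scores : List Int) (paths : List (List Int)) (count : Int) (out : Int × List Int) : Decidable (Spec_get_contrained_solution scores paths count out) := by unfold Spec_get_contrained_solution; infer_instance

-- ===== CLAIM (what is proved, stated in full; the proofs are below) =====
def Claim_equal_get_contrained_solution : Prop := ∀ (scores : List Int) (paths : List (List Int)) (count : Int), Dom_get_contrained_solution scores paths count → Pre_get_contrained_solution scores paths count → Spec_get_contrained_solution scores paths count (get_contrained_solution scores paths count)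

-- ===== LEMMAS AND PROOFS =====

-- scores[-1] on a nonempty list returns an element
theorem pvGet_neg_one_isSome {α : Type} (xs : List α) (h : xs ≠ []) :
    ∃ a, PySem.List.pyGet? xs (-1) = some a := by
  have hl : 0 < xs.length := List.length_pos_iff.mpr h
  have h2 : PySem.List.pyGet? xs (-1) = xs[xs.length - 1]? := by
    have hle : -(xs.length : Int) ≤ -1 := by omega
    simp [PySem.List.pyGet?, PySem.List.pyIdx?, hle]
  rw [h2]
  exact ⟨xs[xs.length - 1], by rw [List.getElem?_eq_getElem (by omega)]⟩

-- the A-loop is find? with a default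
theorem pvLoopA_eq_find (count : Int) (d : Int × List Int) (l : List (Int × List Int)) :
    pvLoopA count d l =
      match l.find? (fun t => ((t.2.length : Int) == count)) with
      | some t => t
      | none => d := by
  induction l with
  | nil => rfl
  | cons t rest ih =>
    by_cases h : ((t.2.length : Int) == count) = true
    · simp [pvLoopA, List.find?, h]
    · simp only [pvLoopA, List.find?, h, if_false, Bool.false_eq_true] at *
      simpa [h] using ih

-- key lemma: inserting x into a descending-sorted list commutes find? with one B-step
theorem pvFind_insertBy (count : Int) (x : Int × List Int) (s : List (Int × List Int))
    (hs : s.Pairwise (fun a b => b.1 ≤ a.1)) :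
    (PySem.List.insertBy (fun a b => decide (b.1 < a.1)) x s).find?
        (fun t => ((t.2.length : Int) == count))
      = pvStepB count (s.find? (fun t => ((t.2.length : Int) == count))) x := by
  induction s with
  | nil =>
    by_cases hx : (((x.2.length : Int)) == count) = true <;>
      simp [PySem.List.insertBy, pvStepB, List.find?, hx]
  | cons y ys ih =>
    have hy_ys : ∀ b ∈ ys, b.1 ≤ y.1 := (List.pairwise_cons.mp hs).1
    have hys : ys.Pairwise (fun a b => b.1 ≤ a.1) := (List.pairwise_cons.mp hs).2
    by_cases hlt : y.1 < x.1
    · -- x is inserted in front of y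
      have hins : PySem.List.insertBy (fun a b => decide (b.1 < a.1)) x (y :: ys) = x :: y :: ys := by
        simp [PySem.List.insertBy, hlt]
      rw [hins]
      by_cases hx : (((x.2.length : Int)) == count) = true
      · -- x qualifies; any previous find? result has key ≤ y.1 < x.1, so x wins
        cases hfy : (y :: ys).find? (fun t => ((t.2.length : Int) == count)) with
        | none => simp [List.find?, hx, pvStepB]
        | some b =>
          have hb : b ∈ y :: ys := List.mem_of_find?_eq_some hfy
          have hble : b.1 ≤ y.1 := by
            rcases List.mem_cons.mp hb with h | h
            · exact le_of_eq (by rw [h])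
            · exact hy_ys b h
          have hbx : b.1 < x.1 := lt_of_le_of_lt hble hlt
          simp [List.find?, hx, pvStepB, hbx]
      · simp [List.find?, hx, pvStepB]
    · -- x goes after y
      have hins : PySem.List.insertBy (fun a b => decide (b.1 < a.1)) x (y :: ys)
          = y :: PySem.List.insertBy (fun a b => decide (b.1 < a.1)) x ys := by
        simp [PySem.List.insertBy, hlt]
      rw [hins]
      by_cases hyq : (((y.2.length : Int)) == count) = true
      · -- y stays the first qualifying element: step keeps y since ¬ y.1 < x.1
        simp [List.find?, hyq, pvStepB, hlt]
      · simp only [List.find?, hyq]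
        simpa [hyq] using ih hys

-- main invariant: find? over the stable descending sort = B's left fold
theorem pvFind_sorted_eq_fold (count : Int) (sp : List (Int × List Int)) :
    (PySem.List.sorted sp (fun tup => tup.1) true).find?
        (fun t => ((t.2.length : Int) == count))
      = sp.foldl (pvStepB count) none := by
  rw [PySem.List.sorted_rev_eq_foldl_insertBy]
  induction sp using List.reverseRecOn with
  | nil => rfl
  | append_singleton xs x ih =>
    rw [List.foldl_append, List.foldl_append]
    simp only [List.foldl_cons, List.foldl_nil]
    have hpw : (List.foldl (fun acc x => PySem.List.insertBy (fun a b => decide ((fun tup => tup.1) b < (fun tup => tup.1) a)) x acc) [] xs).Pairwise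
        (fun a b : Int × List Int => b.1 ≤ a.1) := by
      have := PySem.List.sorted_pairwise_rev xs (fun tup : Int × List Int => tup.1)
      rwa [PySem.List.sorted_rev_eq_foldl_insertBy] at this
    rw [pvFind_insertBy count x _ hpw, ih]

-- ===== VERDICT (by name: the statement is the Claim_ definition above) =====
theorem get_contrained_solution_spec : Claim_equal_get_contrained_solution := by
  intro scores paths count _hdom hpre
  obtain ⟨hs, hp⟩ := hpre
  obtain ⟨s0, hs0⟩ := pvGet_neg_one_isSome scores hs
  obtain ⟨p0, hp0⟩ := pvGet_neg_one_isSome paths hp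
  unfold Spec_get_contrained_solution get_contrained_solution get_contrained_solution_alt
  rw [hs0, hp0]
  simp only [Option.bind_some, Option.map_some, Option.getD_some]
  rw [pvLoopA_eq_find, pvFind_sorted_eq_fold]
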